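-- pv_equiv track=rewrite | github.com/tjbearse/sheet-block-editor | src/generateBlockDef/generate.py | buildTheme
-- ===== SOURCE A (Python) =====
-- colorPalette=[
--     '#1f77b4',
--     '#aec7e8',
--     '#ff7f0e',
--     '#ffbb78',
--     '#2ca02c',
--     '#98df8a',
--     '#d62728',
--     '#ff9896',
--     '#9467bd',
--     '#c5b0d5',
--     '#8c564b',
--     '#c49c94',
--     '#e377c2',
--     '#f7b6d2',
--     '#7f7f7f',
--     '#c7c7c7',
--     '#bcbd22',
--     '#dbdb8d',
--     '#17becf',
--     '#9edae5'
-- ]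
--
-- def buildTheme(categories):
--     # TODO select specific colors for each category
--     colors = {
--         category: colorPalette[i]
--         for i, category in enumerate(categories.keys())
--     }
--     blockStyles= {
--         f"{category}_style": {
--             "colourPrimary": colors[category],
--             "colourSecondary":"#AD7BE9",
--             "colourTertiary":"#CDB6E9"
--         }
--         for category in categories.keys()
--     }
--     categoryStyles= {
--             f"{category}_category": {
--                 "colour": colors[category],
--             }
--             for category in categories.keys()
--         }
--     return {
--         'blockStyles' : blockStyles,
--         'categoryStyles' : categoryStyles,
--         'componentStyles' : {}
--     }
-- ===== SOURCE B (Python) =====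
-- colorPalette=[
--     '#1f77b4',
--     '#aec7e8',
--     '#ff7f0e',
--     '#ffbb78',
--     '#2ca02c',
--     '#98df8a',
--     '#d62728',
--     '#ff9896',
--     '#9467bd',
--     '#c5b0d5',
--     '#8c564b',
--     '#c49c94',
--     '#e377c2',
--     '#f7b6d2',
--     '#7f7f7f',
--     '#c7c7c7',
--     '#bcbd22',
--     '#dbdb8d',
--     '#17becf',
--     '#9edae5'
-- ]
--
--
-- def _stylesFrom(keys, palette):
--     # recursion on the key list, consuming the palette in step; builds both
--     # style dicts back-to-front (front entry first, then the recursive rest)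
--     if not keys:
--         return {}, {}
--     c = palette[0]
--     k = keys[0]
--     restBlock, restCategory = _stylesFrom(keys[1:], palette[1:])
--     block = {f"{k}_style": {
--         "colourPrimary": c,
--         "colourSecondary": "#AD7BE9",
--         "colourTertiary": "#CDB6E9",
--     }}
--     block.update(restBlock)
--     category = {f"{k}_category": {"colour": c}}
--     category.update(restCategory)
--     return block, category
--
--
-- def buildTheme(categories):
--     blockStyles, categoryStyles = _stylesFrom(list(categories), colorPalette)
--     return {
--         'blockStyles': blockStyles,
--         'categoryStyles': categoryStyles,
--         'componentStyles': {},
--     }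
-- ===== Notes on version B (the rewrite author's own statement) =====
-- stated objective: alternative
-- what changed: Replaces A's three staged dict comprehensions over an indexed colors lookup table by a structural recursion that consumes the key list and the palette list in parallel and assembles both style dicts back-to-front via dict.update.
import Mathlib
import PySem

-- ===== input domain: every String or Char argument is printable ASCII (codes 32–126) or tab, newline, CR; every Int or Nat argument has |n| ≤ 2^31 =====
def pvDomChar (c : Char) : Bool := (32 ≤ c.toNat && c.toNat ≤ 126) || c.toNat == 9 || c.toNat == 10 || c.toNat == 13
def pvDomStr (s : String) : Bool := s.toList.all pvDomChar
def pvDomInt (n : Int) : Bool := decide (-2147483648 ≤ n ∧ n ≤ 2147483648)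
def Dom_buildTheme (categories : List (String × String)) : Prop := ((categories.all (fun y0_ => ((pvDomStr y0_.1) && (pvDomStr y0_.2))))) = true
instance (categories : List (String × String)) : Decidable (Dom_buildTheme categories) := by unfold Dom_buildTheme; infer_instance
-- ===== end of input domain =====

-- B replaces A's three staged dict comprehensions over an indexed colors table by one structural
-- recursion consuming keys and palette in parallel, assembling both dicts back-to-front (objective:
-- alternative; return value only).

def pvPalette : List String :=
  ["#1f77b4", "#aec7e8", "#ff7f0e", "#ffbb78", "#2ca02c", "#98df8a", "#d62728",
   "#ff9896", "#9467bd", "#c5b0d5", "#8c564b", "#c49c94", "#e377c2", "#f7b6d2",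
   "#7f7f7f", "#c7c7c7", "#bcbd22", "#dbdb8d", "#17becf", "#9edae5"]

-- ===== PORT A =====
def buildTheme (categories : List (String × String)) : List (String × List (String × List (String × String))) :=
  let keys := categories.map Prod.fst
  -- colors = {category: colorPalette[i] for i, category in enumerate(categories.keys())}
  -- (colorPalette[i] raises IndexError past the palette: Pre_ bounds the length)
  let colors : PySem.Dict String String :=
    (PySem.List.enumerate keys).foldl
      (fun d p => d.insert p.2 (PySem.List.pyGetD pvPalette p.1 "")) PySem.Dict.empty
  let blockStyles : PySem.Dict String (List (String × String)) :=
    keys.foldl (fun d category =>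
      d.insert (category ++ "_style")
        [("colourPrimary", colors.getD category ""),
         ("colourSecondary", "#AD7BE9"),
         ("colourTertiary", "#CDB6E9")]) PySem.Dict.empty
  let categoryStyles : PySem.Dict String (List (String × String)) :=
    keys.foldl (fun d category =>
      d.insert (category ++ "_category")
        [("colour", colors.getD category "")]) PySem.Dict.empty
  [("blockStyles", blockStyles.items),
   ("categoryStyles", categoryStyles.items),
   ("componentStyles", [])]

-- ===== PORT B =====
-- d.update(e): insert e's items in order (faithful port of dict.update)
def pvUpdate (d e : PySem.Dict String (List (String × String))) : PySem.Dict String (List (String × String)) :=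
  e.items.foldl (fun d p => d.insert p.1 p.2) d

-- _stylesFrom(keys, palette): recursion on the key list, consuming the palette in step
def pvStylesFrom : List String → List String →
    PySem.Dict String (List (String × String)) × PySem.Dict String (List (String × String))
  | [], _ => (PySem.Dict.empty, PySem.Dict.empty)
  | _ :: _, [] => (PySem.Dict.empty, PySem.Dict.empty)
    -- palette[0] raises IndexError in Python here; unreachable under Pre_ (≤ 20 categories)
  | k :: ks, c :: cs =>
    let rest := pvStylesFrom ks cs
    (pvUpdate (PySem.Dict.empty.insert (k ++ "_style")
        [("colourPrimary", c), ("colourSecondary", "#AD7BE9"), ("colourTertiary", "#CDB6E9")]) rest.1,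
     pvUpdate (PySem.Dict.empty.insert (k ++ "_category") [("colour", c)]) rest.2)

def buildTheme_alt (categories : List (String × String)) : List (String × List (String × List (String × String))) :=
  let p := pvStylesFrom (categories.map Prod.fst) pvPalette
  [("blockStyles", p.1.items),
   ("categoryStyles", p.2.items),
   ("componentStyles", [])]

-- ===== PRECONDITION & SPEC =====
-- categories is a Python dict, so its keys are unique; more than 20 categories make
-- colorPalette[i] raise IndexError in A (and palette[0] in B), so such inputs are excluded.
def Pre_buildTheme (categories : List (String × String)) : Prop :=
  (categories.map Prod.fst).Nodup ∧ categories.length ≤ 20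
instance (categories : List (String × String)) : Decidable (Pre_buildTheme categories) := by unfold Pre_buildTheme; infer_instance

def pvWitness_buildTheme : (List (String × String)) := [("logic", "a"), ("math", "b")]

def Spec_buildTheme (categories : List (String × String)) (out : List (String × List (String × List (String × String)))) : Prop := out = buildTheme_alt categories
instance (categories : List (String × String)) (out : List (String × List (String × List (String × String)))) : Decidable (Spec_buildTheme categories out) := by unfold Spec_buildTheme; infer_instance

-- ===== CLAIM (what is proved, stated in full; the proofs are below) =====
def Claim_equal_buildTheme : Prop := ∀ (categories : List (String × String)), Dom_buildTheme categories → Pre_buildTheme categories → Spec_buildTheme categories (buildTheme categories)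

-- ===== LEMMAS AND PROOFS =====

-- (· ++ suffix) is injective on String, so the style/category keys stay distinct
lemma pv_append_right_inj (s : String) : Function.Injective (fun a : String => a ++ s) := by
  intro a b h
  have := congrArg String.toList h
  simp only [String.toList_append] at this
  exact String.toList_injective (List.append_cancel_right this)

-- A's colors dict looks up to exactly the palette colour of the key's index
lemma pv_colors_getD (keys : List String) (hnd : keys.Nodup) (k : Nat) (hk : k < keys.length) :
    ((PySem.List.enumerate keys).foldl
      (fun d p => d.insert p.2 (PySem.List.pyGetD pvPalette p.1 "")) PySem.Dict.empty).getD keys[k] ""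
    = PySem.List.pyGetD pvPalette (k : Int) "" := by
  have hmapsnd : (PySem.List.enumerate keys 0).map (·.2) = keys := PySem.List.map_snd_enumerate keys 0
  have hitems := PySem.Dict.items_foldl_insert_fresh (PySem.List.enumerate keys 0)
      (fun p => p.2) (fun p => PySem.List.pyGetD pvPalette p.1 "") PySem.Dict.empty
      (by intro a _; simp) (by rw [show (List.map (fun p => p.2) (PySem.List.enumerate keys 0)) = keys from hmapsnd]; exact hnd)
  have hmem : ((k : Int), keys[k]) ∈ PySem.List.enumerate keys 0 := by
    rw [PySem.List.mem_enumerate_iff]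
    exact ⟨k, hk, by simp⟩
  have hin : (keys[k], PySem.List.pyGetD pvPalette (k : Int) "") ∈
      ((PySem.List.enumerate keys).foldl
        (fun d p => d.insert p.2 (PySem.List.pyGetD pvPalette p.1 "")) PySem.Dict.empty).items := by
    rw [hitems]
    exact List.mem_append_right _ (List.mem_map.mpr ⟨((k : Int), keys[k]), hmem, rfl⟩)
  have hkeysnd : ((PySem.List.enumerate keys).foldl
      (fun d p => d.insert p.2 (PySem.List.pyGetD pvPalette p.1 "")) PySem.Dict.empty).keys.Nodup := by
    simp only [PySem.Dict.keys, hitems, List.map_append, List.map_map]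
    rw [show (List.map ((fun x => x.1) ∘ fun a => (a.2, PySem.List.pyGetD pvPalette a.1 "")) (PySem.List.enumerate keys)) = keys from hmapsnd]
    simp [PySem.Dict.empty, hnd]
  exact PySem.Dict.getD_of_mem_items _ hin hkeysnd ""

-- A's component fold, as a plain map over enumerate
lemma pv_A_items (l : List (String × String)) (hnd : (l.map Prod.fst).Nodup)
    (suf : String) (mk : String → List (String × String)) :
    ((l.map Prod.fst).foldl (fun d category =>
        d.insert (category ++ suf)
          (mk (((PySem.List.enumerate (l.map Prod.fst)).foldl
            (fun d p => d.insert p.2 (PySem.List.pyGetD pvPalette p.1 "")) PySem.Dict.empty).getD category ""))) PySem.Dict.empty).items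
    = (PySem.List.enumerate (l.map Prod.fst)).map
        (fun p => (p.2 ++ suf, mk (PySem.List.pyGetD pvPalette p.1 ""))) := by
  have hndA : ((l.map Prod.fst).map (· ++ suf)).Nodup := hnd.map (pv_append_right_inj suf)
  rw [PySem.Dict.items_foldl_insert_fresh (l.map Prod.fst) (fun category => category ++ suf) _ _
        (by intro a _; simp) hndA]
  apply List.ext_getElem
  · simp [PySem.List.length_enumerate, PySem.Dict.empty]
  · intro k hk1 hk2
    have hkl : k < (l.map Prod.fst).length := by
      simpa [PySem.Dict.empty] using hk1
    have hc := pv_colors_getD (l.map Prod.fst) hnd k hkl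
    simp only [PySem.Dict.empty, List.nil_append, List.getElem_map]
    rw [PySem.List.getElem_enumerate]
    simp only [zero_add, List.getElem_map] at hc ⊢
    simp only [PySem.Dict.empty] at hc
    rw [hc]

-- zip keys, pushed through a map on the first component, are an initial segment of the keys
lemma pv_zip_map_fst (ks : List String) (cs : List String) (suf : String) :
    (ks.zip cs).map (fun q => q.1 ++ suf) = (ks.take cs.length).map (· ++ suf) := by
  induction ks generalizing cs with
  | nil => simp
  | cons k ks ih =>
    cases cs with
    | nil => simp
    | cons c cs => simp [ih]

-- B's dict.update over fresh distinct keys appends the items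
lemma pv_update_items (d e : PySem.Dict String (List (String × String)))
    (hfresh : ∀ p ∈ e.items, d.contains p.1 = false) (hnd : e.keys.Nodup) :
    (pvUpdate d e).items = d.items ++ e.items := by
  unfold pvUpdate
  rw [PySem.Dict.items_foldl_insert_fresh e.items (fun p => p.1) (fun p => p.2) d hfresh
        (by simpa [PySem.Dict.keys] using hnd)]
  simp

-- B's recursion produces exactly the zipped key/colour items, in order
lemma pv_rec_items (ks : List String) (cs : List String)
    (h1 : (ks.map (· ++ "_style")).Nodup) (h2 : (ks.map (· ++ "_category")).Nodup) :
    (pvStylesFrom ks cs).1.items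
      = (ks.zip cs).map (fun q => (q.1 ++ "_style",
          [("colourPrimary", q.2), ("colourSecondary", "#AD7BE9"), ("colourTertiary", "#CDB6E9")]))
    ∧ (pvStylesFrom ks cs).2.items
      = (ks.zip cs).map (fun q => (q.1 ++ "_category", [("colour", q.2)])) := by
  induction ks generalizing cs with
  | nil => exact ⟨rfl, rfl⟩
  | cons k ks ih =>
    cases cs with
    | nil => exact ⟨rfl, rfl⟩
    | cons c cs =>
      simp only [List.map_cons, List.nodup_cons] at h1 h2
      obtain ⟨hk1, hks1⟩ := h1
      obtain ⟨hk2, hks2⟩ := h2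
      obtain ⟨ihb, ihc⟩ := ih cs hks1 hks2
      have hsub1 : ((ks.take cs.length).map (· ++ "_style")).Sublist (ks.map (· ++ "_style")) :=
        (List.take_sublist _ _).map _
      have hsub2 : ((ks.take cs.length).map (· ++ "_category")).Sublist (ks.map (· ++ "_category")) :=
        (List.take_sublist _ _).map _
      constructor
      · show (pvUpdate _ (pvStylesFrom ks cs).1).items = _
        rw [pv_update_items]
        · simp [ihb, PySem.Dict.insert, PySem.Dict.empty]
        · intro p hp
          rw [ihb] at hp
          obtain ⟨q, hq, rfl⟩ := List.mem_map.mp hp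
          have hmem : q.1 ++ "_style" ∈ ks.map (· ++ "_style") :=
            List.mem_map.mpr ⟨q.1, (List.of_mem_zip hq).1, rfl⟩
          simp [PySem.Dict.contains, PySem.Dict.empty, PySem.Dict.insert]
          intro h
          exact hk1 (by rw [h]; exact hmem)
        · rw [PySem.Dict.keys, ihb, List.map_map]
          have : ((ks.zip cs).map (fun q => q.1 ++ "_style")).Nodup := by
            rw [pv_zip_map_fst ks cs "_style"]; exact hks1.sublist hsub1
          simpa using this
      · show (pvUpdate _ (pvStylesFrom ks cs).2).items = _
        rw [pv_update_items]
        · simp [ihc, PySem.Dict.insert, PySem.Dict.empty]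
        · intro p hp
          rw [ihc] at hp
          obtain ⟨q, hq, rfl⟩ := List.mem_map.mp hp
          have hmem : q.1 ++ "_category" ∈ ks.map (· ++ "_category") :=
            List.mem_map.mpr ⟨q.1, (List.of_mem_zip hq).1, rfl⟩
          simp [PySem.Dict.contains, PySem.Dict.empty, PySem.Dict.insert]
          intro h
          exact hk2 (by rw [h]; exact hmem)
        · rw [PySem.Dict.keys, ihc, List.map_map]
          have : ((ks.zip cs).map (fun q => q.1 ++ "_category")).Nodup := by
            rw [pv_zip_map_fst ks cs "_category"]; exact hks2.sublist hsub2
          simpa using this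

-- the enumerate-indexed palette lookups coincide with zipping against the palette
lemma pv_canon (ks : List String) (hlen : ks.length ≤ 20)
    (suf : String) (mk : String → List (String × String)) :
    (PySem.List.enumerate ks).map (fun p => (p.2 ++ suf, mk (PySem.List.pyGetD pvPalette p.1 "")))
    = (ks.zip pvPalette).map (fun q => (q.1 ++ suf, mk q.2)) := by
  have hpal : pvPalette.length = 20 := by decide
  apply List.ext_getElem
  · simp [PySem.List.length_enumerate, List.length_zip, hpal]
    omega
  · intro k hk1 hk2
    have hkl : k < ks.length := by
      simpa [PySem.List.length_enumerate] using hk1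
    have hk20 : k < pvPalette.length := by omega
    simp only [List.getElem_map, PySem.List.getElem_enumerate, List.getElem_zip, zero_add]
    congr 1
    congr 1
    rw [PySem.List.pyGetD_natCast]
    simp [List.getD, hk20]

theorem buildTheme_spec : Claim_equal_buildTheme := by
  intro categories _ hpre
  obtain ⟨hnd, hlen⟩ := hpre
  unfold Spec_buildTheme buildTheme buildTheme_alt
  simp only []
  have hnd1 : ((categories.map Prod.fst).map (· ++ "_style")).Nodup :=
    hnd.map (pv_append_right_inj "_style")
  have hnd2 : ((categories.map Prod.fst).map (· ++ "_category")).Nodup :=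
    hnd.map (pv_append_right_inj "_category")
  obtain ⟨hb, hc⟩ := pv_rec_items (categories.map Prod.fst) pvPalette hnd1 hnd2
  rw [pv_A_items categories hnd "_style"
        (fun c => [("colourPrimary", c), ("colourSecondary", "#AD7BE9"), ("colourTertiary", "#CDB6E9")]),
      pv_A_items categories hnd "_category" (fun c => [("colour", c)]),
      pv_canon (categories.map Prod.fst) (by simpa using hlen) "_style"
        (fun c => [("colourPrimary", c), ("colourSecondary", "#AD7BE9"), ("colourTertiary", "#CDB6E9")]),
      pv_canon (categories.map Prod.fst) (by simpa using hlen) "_category" (fun c => [("colour", c)]),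
      hb, hc]
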